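-- pv_equiv track=rewrite | github.com/pypi-data/pypi-mirror-75 | packages/Frontiersman/Frontiersman-1.0.22.tar.gz/Frontiersman-1.0.22/frontiersman/client/Gui.py | translate_set_cards
-- ===== SOURCE A (Python) =====
-- def translate_set_cards(card_key):
--     array = [0, 0, 0, 0, 0, 0, 0, 0, 0, 0]
--     for r in card_key:
--         if r == 'Brick':
--             array[1] += 1
--         elif r == 'Wheat':
--             array[3] += 1
--         elif r == 'Wood':
--             array[0] += 1
--         elif r == 'Ore':
--             array[4] += 1
--         elif r == 'Sheep':
--             array[2] += 1
--         elif r == 'knight':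
--             array[5] += 1
--         elif r == 'monopoly':
--             array[6] += 1
--         elif r == 'roadBuilding':
--             array[7] += 1
--         elif r == 'yearOfPlenty':
--             array[8] += 1
--         elif r == 'victoryPoint':
--             array[9] += 1
--     return array
-- ===== SOURCE B (Python) =====
-- KEYS = ['Wood', 'Brick', 'Sheep', 'Wheat', 'Ore',
--         'knight', 'monopoly', 'roadBuilding', 'yearOfPlenty', 'victoryPoint']
--
-- def translate_set_cards(card_key):
--     # One scan of the input per known key: ten staged count passes
--     # instead of A's single pass with per-element branching.
--     return [card_key.count(k) for k in KEYS]
-- ===== Notes on version B (the rewrite author's own statement) =====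
-- stated objective: simpler
-- what changed: Replaces A's single pass with a per-element if/elif chain mutating a 10-slot array by ten staged scans of the input, one list.count pass per known key, assembled by a comprehension over the fixed key list.
import Mathlib
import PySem

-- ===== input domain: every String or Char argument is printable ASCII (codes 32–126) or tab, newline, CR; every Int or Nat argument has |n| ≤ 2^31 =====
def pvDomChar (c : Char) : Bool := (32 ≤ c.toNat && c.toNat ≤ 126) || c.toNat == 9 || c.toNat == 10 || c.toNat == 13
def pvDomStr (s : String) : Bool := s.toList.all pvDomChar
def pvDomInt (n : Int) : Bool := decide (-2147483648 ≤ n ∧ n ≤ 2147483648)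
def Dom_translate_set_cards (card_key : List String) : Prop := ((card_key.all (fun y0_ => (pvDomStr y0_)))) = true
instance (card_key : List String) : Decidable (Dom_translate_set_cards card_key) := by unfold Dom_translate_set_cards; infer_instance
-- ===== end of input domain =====

-- B counts each of the ten known keys with its own list.count scan over the input (ten staged passes) instead of A's single pass with per-element branching; objective: simpler.


-- ===== PORT A =====
def tscStep (arr : List Int) (r : String) : List Int :=
  if r == "Brick" then PySem.List.pySetD arr 1 (PySem.List.pyGetD arr 1 0 + 1)
  else if r == "Wheat" then PySem.List.pySetD arr 3 (PySem.List.pyGetD arr 3 0 + 1)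
  else if r == "Wood" then PySem.List.pySetD arr 0 (PySem.List.pyGetD arr 0 0 + 1)
  else if r == "Ore" then PySem.List.pySetD arr 4 (PySem.List.pyGetD arr 4 0 + 1)
  else if r == "Sheep" then PySem.List.pySetD arr 2 (PySem.List.pyGetD arr 2 0 + 1)
  else if r == "knight" then PySem.List.pySetD arr 5 (PySem.List.pyGetD arr 5 0 + 1)
  else if r == "monopoly" then PySem.List.pySetD arr 6 (PySem.List.pyGetD arr 6 0 + 1)
  else if r == "roadBuilding" then PySem.List.pySetD arr 7 (PySem.List.pyGetD arr 7 0 + 1)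
  else if r == "yearOfPlenty" then PySem.List.pySetD arr 8 (PySem.List.pyGetD arr 8 0 + 1)
  else if r == "victoryPoint" then PySem.List.pySetD arr 9 (PySem.List.pyGetD arr 9 0 + 1)
  else arr

def translate_set_cards (card_key : List String) : List Int :=
  card_key.foldl tscStep [0, 0, 0, 0, 0, 0, 0, 0, 0, 0]

-- ===== PORT B =====
def tscKeys : List String :=
  ["Wood", "Brick", "Sheep", "Wheat", "Ore",
   "knight", "monopoly", "roadBuilding", "yearOfPlenty", "victoryPoint"]

def translate_set_cards_alt (card_key : List String) : List Int :=
  tscKeys.map (fun k => (PySem.List.count card_key k : Int))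

-- ===== PRECONDITION & SPEC =====
def Spec_translate_set_cards (card_key : List String) (out : List Int) : Prop := out = translate_set_cards_alt card_key
instance (card_key : List String) (out : List Int) : Decidable (Spec_translate_set_cards card_key out) := by unfold Spec_translate_set_cards; infer_instance

-- ===== CLAIM (what is proved, stated in full; the proofs are below) =====
def Claim_equal_translate_set_cards : Prop := ∀ (card_key : List String), Dom_translate_set_cards card_key → Spec_translate_set_cards card_key (translate_set_cards card_key)

-- ===== LEMMAS AND PROOFS =====
theorem tscStep_Wood (a0 a1 a2 a3 a4 a5 a6 a7 a8 a9 : Int) :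
    tscStep [a0, a1, a2, a3, a4, a5, a6, a7, a8, a9] "Wood" = [a0 + 1, a1, a2, a3, a4, a5, a6, a7, a8, a9] := by
  simp [tscStep, pysem]

theorem tscStep_Brick (a0 a1 a2 a3 a4 a5 a6 a7 a8 a9 : Int) :
    tscStep [a0, a1, a2, a3, a4, a5, a6, a7, a8, a9] "Brick" = [a0, a1 + 1, a2, a3, a4, a5, a6, a7, a8, a9] := by
  simp [tscStep, pysem]

theorem tscStep_Sheep (a0 a1 a2 a3 a4 a5 a6 a7 a8 a9 : Int) :
    tscStep [a0, a1, a2, a3, a4, a5, a6, a7, a8, a9] "Sheep" = [a0, a1, a2 + 1, a3, a4, a5, a6, a7, a8, a9] := by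
  simp [tscStep, pysem]

theorem tscStep_Wheat (a0 a1 a2 a3 a4 a5 a6 a7 a8 a9 : Int) :
    tscStep [a0, a1, a2, a3, a4, a5, a6, a7, a8, a9] "Wheat" = [a0, a1, a2, a3 + 1, a4, a5, a6, a7, a8, a9] := by
  simp [tscStep, pysem]

theorem tscStep_Ore (a0 a1 a2 a3 a4 a5 a6 a7 a8 a9 : Int) :
    tscStep [a0, a1, a2, a3, a4, a5, a6, a7, a8, a9] "Ore" = [a0, a1, a2, a3, a4 + 1, a5, a6, a7, a8, a9] := by
  simp [tscStep, pysem]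

theorem tscStep_knight (a0 a1 a2 a3 a4 a5 a6 a7 a8 a9 : Int) :
    tscStep [a0, a1, a2, a3, a4, a5, a6, a7, a8, a9] "knight" = [a0, a1, a2, a3, a4, a5 + 1, a6, a7, a8, a9] := by
  simp [tscStep, pysem]

theorem tscStep_monopoly (a0 a1 a2 a3 a4 a5 a6 a7 a8 a9 : Int) :
    tscStep [a0, a1, a2, a3, a4, a5, a6, a7, a8, a9] "monopoly" = [a0, a1, a2, a3, a4, a5, a6 + 1, a7, a8, a9] := by
  simp [tscStep, pysem]

theorem tscStep_roadBuilding (a0 a1 a2 a3 a4 a5 a6 a7 a8 a9 : Int) :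
    tscStep [a0, a1, a2, a3, a4, a5, a6, a7, a8, a9] "roadBuilding" = [a0, a1, a2, a3, a4, a5, a6, a7 + 1, a8, a9] := by
  simp [tscStep, pysem]

theorem tscStep_yearOfPlenty (a0 a1 a2 a3 a4 a5 a6 a7 a8 a9 : Int) :
    tscStep [a0, a1, a2, a3, a4, a5, a6, a7, a8, a9] "yearOfPlenty" = [a0, a1, a2, a3, a4, a5, a6, a7, a8 + 1, a9] := by
  simp [tscStep, pysem]

theorem tscStep_victoryPoint (a0 a1 a2 a3 a4 a5 a6 a7 a8 a9 : Int) :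
    tscStep [a0, a1, a2, a3, a4, a5, a6, a7, a8, a9] "victoryPoint" = [a0, a1, a2, a3, a4, a5, a6, a7, a8, a9 + 1] := by
  simp [tscStep, pysem]

theorem tscStep_other (arr : List Int) (r : String) (h1 : r ≠ "Brick") (h2 : r ≠ "Wheat") (h3 : r ≠ "Wood") (h4 : r ≠ "Ore") (h5 : r ≠ "Sheep") (h6 : r ≠ "knight") (h7 : r ≠ "monopoly") (h8 : r ≠ "roadBuilding") (h9 : r ≠ "yearOfPlenty") (h10 : r ≠ "victoryPoint") :
    tscStep arr r = arr := by
  simp [tscStep, h1, h2, h3, h4, h5, h6, h7, h8, h9, h10]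

theorem tsc_foldl_counts (ck : List String) (a0 a1 a2 a3 a4 a5 a6 a7 a8 a9 : Int) :
    ck.foldl tscStep [a0, a1, a2, a3, a4, a5, a6, a7, a8, a9] = [a0 + ck.count "Wood", a1 + ck.count "Brick", a2 + ck.count "Sheep", a3 + ck.count "Wheat", a4 + ck.count "Ore", a5 + ck.count "knight", a6 + ck.count "monopoly", a7 + ck.count "roadBuilding", a8 + ck.count "yearOfPlenty", a9 + ck.count "victoryPoint"] := by
  induction ck generalizing a0 a1 a2 a3 a4 a5 a6 a7 a8 a9 with
  | nil => simp
  | cons r rest ih =>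
    simp only [List.foldl_cons]
    by_cases h1 : r = "Brick"
    · rw [h1, tscStep_Brick, ih]; simp; ring_nf
    by_cases h2 : r = "Wheat"
    · rw [h2, tscStep_Wheat, ih]; simp; ring_nf
    by_cases h3 : r = "Wood"
    · rw [h3, tscStep_Wood, ih]; simp; ring_nf
    by_cases h4 : r = "Ore"
    · rw [h4, tscStep_Ore, ih]; simp; ring_nf
    by_cases h5 : r = "Sheep"
    · rw [h5, tscStep_Sheep, ih]; simp; ring_nf
    by_cases h6 : r = "knight"
    · rw [h6, tscStep_knight, ih]; simp; ring_nf
    by_cases h7 : r = "monopoly"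
    · rw [h7, tscStep_monopoly, ih]; simp; ring_nf
    by_cases h8 : r = "roadBuilding"
    · rw [h8, tscStep_roadBuilding, ih]; simp; ring_nf
    by_cases h9 : r = "yearOfPlenty"
    · rw [h9, tscStep_yearOfPlenty, ih]; simp; ring_nf
    by_cases h10 : r = "victoryPoint"
    · rw [h10, tscStep_victoryPoint, ih]; simp; ring_nf
    · rw [tscStep_other _ r h1 h2 h3 h4 h5 h6 h7 h8 h9 h10, ih]; simp [h1, h2, h3, h4, h5, h6, h7, h8, h9, h10]

-- ===== VERDICT (by name: the statement is the Claim_ definition above) =====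
theorem translate_set_cards_spec : Claim_equal_translate_set_cards := by
  intro ck _
  unfold Spec_translate_set_cards translate_set_cards translate_set_cards_alt tscKeys
  simp [tsc_foldl_counts, PySem.List.count_eq]
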